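-- pv_equiv track=rewrite | github.com/AndriyAndriyovuch/CheckIO | Scientific Expedition/caps_lock.py | caps_lock
-- ===== SOURCE A (Python) =====
-- def caps_lock(text: str) -> str:
--     res = []
--     for let in text:
--         res.append(let)
--
--     final = []
--     check = 0
--     for i in res:
--         if i.isalpha():
--             if i.islower():
--                 if i == 'a':
--                     i = ''
--                     check += 1
--                     pass
--                 if check == 0:
--                     final.append(i)
--                 elif check % 2 == 1 and i != '':
--                     if i.isupper():
--                         final.append(i.lower())
--                     elif i.islower():
--                         final.append(i.upper())
--                 elif check % 2 == 0 and i != '':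
--                     if i.isupper():
--                         final.append(i.upper())
--                     elif i.islower():
--                         final.append(i.lower())
--             else:
--                 final.append(i)
--         else:
--             final.append(i)
--
--     result = ''.join(final)
--
--     return result
-- ===== SOURCE B (Python) =====
-- def caps_lock(text: str) -> str:
--     parts = text.split('a')
--     out = []
--     for idx, seg in enumerate(parts):
--         if idx % 2 == 1:
--             seg = ''.join(ch.upper() if ch.isalpha() and ch.islower() else ch for ch in seg)
--         out.append(seg)
--     return ''.join(out)
-- ===== Notes on version B (the rewrite author's own statement) =====
-- stated objective: simpler
-- what changed: Replaces A's single pass with a running 'a'-counter and a four-way nested branch per character by splitting the text at every 'a' and upper-casing the lowercase letters exactly in the odd-indexed segments, joining the segments back with the empty separator.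
import Mathlib
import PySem

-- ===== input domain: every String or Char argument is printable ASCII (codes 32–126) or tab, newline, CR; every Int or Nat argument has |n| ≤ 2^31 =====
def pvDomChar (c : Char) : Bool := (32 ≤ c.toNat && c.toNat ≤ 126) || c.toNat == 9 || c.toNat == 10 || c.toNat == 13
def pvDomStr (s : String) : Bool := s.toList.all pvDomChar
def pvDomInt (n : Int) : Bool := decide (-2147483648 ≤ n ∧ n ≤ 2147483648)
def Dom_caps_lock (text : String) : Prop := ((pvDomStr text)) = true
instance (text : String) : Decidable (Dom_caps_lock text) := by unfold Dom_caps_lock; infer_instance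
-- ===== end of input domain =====

-- B replaces A's running-'a'-parity character loop by split-on-'a' then map segments by index parity (objective: simpler).

-- ===== PORT A =====
-- A first copies the string into a char list (res = [let for let in text]); that is text.toList.
-- Then one pass with counter `check`, transliterated branch for branch.
def capsLockGo : List Char → Nat → List Char
  | [], _ => []
  | c :: rest, check =>
    if PySem.Chars.isalpha c then
      if PySem.Chars.islower c then
        if c = 'a' then
          -- i = '', check += 1; all three appends below then see i == '' and append nothing
          capsLockGo rest (check + 1)
        else if check = 0 then c :: capsLockGo rest check
        else if check % 2 = 1 then
          (if PySem.Chars.isupper c then PySem.Chars.lowerChar c :: capsLockGo rest check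
           else if PySem.Chars.islower c then PySem.Chars.upperChar c :: capsLockGo rest check
           else capsLockGo rest check)
        else
          (if PySem.Chars.isupper c then PySem.Chars.upperChar c :: capsLockGo rest check
           else if PySem.Chars.islower c then PySem.Chars.lowerChar c :: capsLockGo rest check
           else capsLockGo rest check)
      else c :: capsLockGo rest check
    else c :: capsLockGo rest check

def caps_lock (text : String) : String :=
  String.ofList (capsLockGo text.toList 0)

-- ===== PORT B =====
-- ch.upper() if ch.isalpha() and ch.islower() else ch
def capsLockAltF (c : Char) : Char :=
  if PySem.Chars.isalpha c && PySem.Chars.islower c then PySem.Chars.upperChar c else c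

def caps_lock_alt (text : String) : String :=
  let parts := PySem.Chars.splitOn text.toList ['a']
  String.ofList (PySem.Chars.join []
    ((PySem.List.enumerate parts).map
      (fun p => if PySem.Int.mod p.1 2 = 1 then p.2.map capsLockAltF else p.2)))

-- ===== PRECONDITION & SPEC =====
def Spec_caps_lock (text : String) (out : String) : Prop := out = caps_lock_alt text
instance (text : String) (out : String) : Decidable (Spec_caps_lock text out) := by unfold Spec_caps_lock; infer_instance

-- ===== CLAIM (what is proved, stated in full; the proofs are below) =====
def Claim_equal_caps_lock : Prop := ∀ (text : String), Dom_caps_lock text → Spec_caps_lock text (caps_lock text)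

-- ===== LEMMAS AND PROOFS =====

-- common core: one pass with a Boolean parity
def capsCore : List Char → Bool → List Char
  | [], _ => []
  | c :: rest, p =>
    if c = 'a' then capsCore rest (!p)
    else (if p then capsLockAltF c else c) :: capsCore rest p

theorem islower_not_isupper {c : Char} (h : PySem.Chars.islower c = true) :
    PySem.Chars.isupper c = false := by
  simp [PySem.Chars.islower] at h
  simp [PySem.Chars.isupper]
  intro h1
  exact lt_of_lt_of_le (by decide) h.1

theorem lowerChar_of_islower {c : Char} (h : PySem.Chars.islower c = true) :
    PySem.Chars.lowerChar c = c := by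
  simp [PySem.Chars.lowerChar, islower_not_isupper h]

theorem capsLockGo_eq_core (cs : List Char) (check : Nat) :
    capsLockGo cs check = capsCore cs (check % 2 = 1) := by
  induction cs generalizing check with
  | nil => rfl
  | cons c rest ih =>
    by_cases ha : c = 'a'
    · subst ha
      have h1 : ((check + 1) % 2 = 1) = ¬(check % 2 = 1) := by
        simp; omega
      rw [show capsLockGo ('a' :: rest) check = capsLockGo rest (check + 1) from by
          simp [capsLockGo, PySem.Chars.isalpha, PySem.Chars.islower], ih,
        show capsCore ('a' :: rest) (decide (check % 2 = 1))
            = capsCore rest (!decide (check % 2 = 1)) from by simp [capsCore]]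
      congr 1
      rcases Nat.mod_two_eq_zero_or_one check with h | h <;> simp [h, Nat.add_mod]
    · by_cases hl : PySem.Chars.islower c = true
      · have hal : PySem.Chars.isalpha c = true := by
          simp [PySem.Chars.isalpha, hl]
        have hu := islower_not_isupper hl
        rcases Nat.eq_zero_or_pos check with hc | hc
        · subst hc
          simp [capsLockGo, capsCore, hal, hl, ha, ih]
        · by_cases hp : check % 2 = 1
        
          · simp [capsLockGo, capsCore, hal, hl, ha, hu, hp, capsLockAltF,
              Nat.pos_iff_ne_zero.mp hc, ih]
          · simp [capsLockGo, capsCore, hal, hl, ha, hu, hp,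
              Nat.pos_iff_ne_zero.mp hc, lowerChar_of_islower hl, ih]
      · by_cases hal : PySem.Chars.isalpha c = true
        · simp [capsLockGo, capsCore, hal, hl, ha, capsLockAltF, ih]
        · simp [capsLockGo, capsCore, hal, hl, ha, capsLockAltF, ih]

-- simple single-char splitter equal to splitOn · ['a']
def splitA : List Char → List (List Char)
  | [] => [[]]
  | c :: rest =>
    if c = 'a' then [] :: splitA rest
    else
      match splitA rest with
      | [] => [[c]]
      | p :: ps => (c :: p) :: ps

theorem splitA_ne_nil (cs : List Char) : splitA cs ≠ [] := by
  cases cs with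
  | nil => simp [splitA]
  | cons c rest =>
    simp only [splitA]
    split
    · simp
    · split <;> simp_all

theorem splitOn_go_eq (cs : List Char) :
    ∀ (fuel : Nat) (cur : List Char) (acc : List (List Char)), cs.length ≤ fuel →
    PySem.Chars.splitOn.go ['a'] fuel cs cur acc
      = acc.reverse ++ (splitA cs).modifyHead (cur.reverse ++ ·) := by
  induction cs with
  | nil =>
    intro fuel cur acc _
    cases fuel <;> simp [PySem.Chars.splitOn.go, splitA]
  | cons c rest ih =>
    intro fuel cur acc hf
    cases fuel with
    | zero => simp at hf
    | succ f =>
      have hf' : rest.length ≤ f := by simpa using hf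
      by_cases ha : c = 'a'
      · subst ha
        have hpre : List.isPrefixOf ['a'] ('a' :: rest) = true := by
          simp [List.isPrefixOf]
        simp only [PySem.Chars.splitOn.go, hpre, if_pos]
        rw [show List.drop (['a'] : List Char).length ('a' :: rest) = rest from rfl]
        rw [ih f [] (cur.reverse :: acc) hf']
        simp [splitA, show (fun (x : List Char) => x) = id from rfl, List.modifyHead_id]
      · have hpre : List.isPrefixOf ['a'] (c :: rest) = false := by
          simp [List.isPrefixOf]
          exact fun h => (ha h.symm).elim
        simp only [PySem.Chars.splitOn.go, hpre]
        rw [if_neg (by simp)]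
        rw [ih f (c :: cur) acc hf']
        obtain ⟨p, ps, hps⟩ : ∃ p ps, splitA rest = p :: ps := by
          cases h : splitA rest with
          | nil => exact absurd h (splitA_ne_nil rest)
          | cons p ps => exact ⟨p, ps, rfl⟩
        simp [splitA, ha, hps]

theorem splitOn_eq_splitA (cs : List Char) :
    PySem.Chars.splitOn cs ['a'] = splitA cs := by
  rw [PySem.Chars.splitOn, splitOn_go_eq cs (cs.length + 1) [] [] (by omega)]
  simp [show (fun (x : List Char) => x) = id from rfl, List.modifyHead_id]

theorem join_nil_flatten (ls : List (List Char)) :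
    PySem.Chars.join [] ls = ls.flatten := by
  induction ls with
  | nil => exact PySem.Chars.join_nil []
  | cons a t ih =>
    cases t <;> simp_all [PySem.Chars.join_cons_cons, PySem.Chars.join_singleton]

theorem mod_succ_parity (k : Int) :
    decide (PySem.Int.mod (k + 1) 2 = 1) = !decide (PySem.Int.mod k 2 = 1) := by
  rw [PySem.Int.mod_eq_emod_of_pos (by omega), PySem.Int.mod_eq_emod_of_pos (by omega)]
  by_cases h : k % 2 = 1
  · have h2 : (k + 1) % 2 = 0 := by omega
    simp [h, h2]
  · have h2 : (k + 1) % 2 = 1 := by omega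
    simp [h, h2]

theorem flat_enum_splitA (cs : List Char) (k : Int) (hk : 0 ≤ k) :
    ((PySem.List.enumerate (splitA cs) k).map
        (fun p => if PySem.Int.mod p.1 2 = 1 then p.2.map capsLockAltF else p.2)).flatten
      = capsCore cs (PySem.Int.mod k 2 = 1) := by
  induction cs generalizing k with
  | nil =>
    simp only [splitA, PySem.List.enumerate, List.map_cons, List.map_nil]
    split <;> simp [capsCore]
  | cons c rest ih =>
    by_cases ha : c = 'a'
    · subst ha
      rw [show splitA ('a' :: rest) = [] :: splitA rest from by simp [splitA]]
      simp only [PySem.List.enumerate, List.map_cons]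
      rw [List.flatten_cons, ih (k + 1) (by omega), mod_succ_parity k]
      split <;> simp [capsCore]
    · obtain ⟨p, ps, hps⟩ : ∃ p ps, splitA rest = p :: ps := by
        cases h : splitA rest with
        | nil => exact absurd h (splitA_ne_nil rest)
        | cons p ps => exact ⟨p, ps, rfl⟩
      have ihr := ih k hk
      rw [hps] at ihr
      simp only [PySem.List.enumerate, List.map_cons, List.flatten_cons] at ihr
      rw [show splitA (c :: rest) = (c :: p) :: ps from by simp [splitA, ha, hps]]
      simp only [PySem.List.enumerate, List.map_cons, List.flatten_cons]
      rw [show capsCore (c :: rest) (decide (PySem.Int.mod k 2 = 1))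
            = (if decide (PySem.Int.mod k 2 = 1) then capsLockAltF c else c)
              :: capsCore rest (decide (PySem.Int.mod k 2 = 1)) from by
          rw [capsCore]; rw [if_neg ha]]
      by_cases hp : PySem.Int.mod k 2 = 1
      · rw [if_pos hp] at *
        split
        · rw [List.cons_append, ihr]
        · next h => exact absurd (decide_eq_true hp) h
      · rw [if_neg hp] at *
        split
        · next h => exact absurd (of_decide_eq_true h) hp
        · rw [List.cons_append, ihr]

-- ===== VERDICT (by name: the statement is the Claim_ definition above) =====
theorem caps_lock_spec : Claim_equal_caps_lock := by
  intro text _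
  show caps_lock text = caps_lock_alt text
  unfold caps_lock caps_lock_alt
  simp only [splitOn_eq_splitA, join_nil_flatten]
  rw [capsLockGo_eq_core, flat_enum_splitA text.toList 0 (by omega)]
  norm_num
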